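-- pv_equiv track=rewrite | github.com/davisrbr/bsd-misuse | JB_attacks/adv/strings.py | extract_new_prompt
-- ===== SOURCE A (Python) =====
-- def extract_new_prompt(text):
--     # Split the string into lines
--     lines = text.split('\n')
--     text = f""""Improved_variable": """
--     for line in lines:
--         # Check if 'final_feedback' is in the line
--         if text in line:
--             # Find the index of 'final_feedback' and get everything after it
--             feedback_index = line.find(text)
--             return line[feedback_index + len(text):].strip()
--
--     return None
-- ===== SOURCE B (Python) =====
-- def extract_new_prompt(text):
--     marker = '"Improved_variable": '
--     idx = text.find(marker)
--     if idx == -1: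
--         return None
--     end = text.find('\n', idx)
--     if end == -1:
--         end = len(text)
--     return text[idx + len(marker):end].strip()
-- ===== Notes on version B (the rewrite author's own statement) =====
-- stated objective: idiomatic
-- what changed: B drops the split-into-lines loop entirely: it finds the marker once in the whole text (valid because the marker contains no newline character), locates the end of the enclosing line by searching for the next newline from the match position, and slices/strips that span.
import Mathlib
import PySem

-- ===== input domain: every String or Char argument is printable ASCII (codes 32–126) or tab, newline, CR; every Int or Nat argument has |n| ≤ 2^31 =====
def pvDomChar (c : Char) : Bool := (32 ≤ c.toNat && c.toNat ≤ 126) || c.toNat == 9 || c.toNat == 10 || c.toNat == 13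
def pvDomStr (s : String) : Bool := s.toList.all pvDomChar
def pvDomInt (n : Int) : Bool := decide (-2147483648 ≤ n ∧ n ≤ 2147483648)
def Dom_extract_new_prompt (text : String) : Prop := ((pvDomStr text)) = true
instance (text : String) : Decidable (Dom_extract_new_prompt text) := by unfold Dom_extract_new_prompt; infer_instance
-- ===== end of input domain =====

set_option maxHeartbeats 1000000


-- B replaces A's split-into-lines-then-scan loop by a single global find of the marker
-- plus a search for the next newline to locate the enclosing line's end (objective: idiomatic).

-- ===== PORT A =====
-- A-side helper: the 'for line in lines' loop (first matching line wins)
def pvLoopA (marker : String) : List String → Option String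
  | [] => none
  | line :: rest =>
    if PySem.Str.isIn marker line then
      some (PySem.Str.strip (PySem.Str.slice line
        (some (PySem.Str.find line marker + PySem.Str.len marker)) none))
    else pvLoopA marker rest

def extract_new_prompt (text : String) : Option String :=
  let lines := (PySem.Str.split? text "\n").getD []
  let marker := "\"Improved_variable\": "
  pvLoopA marker lines

-- ===== PORT B =====
def extract_new_prompt_alt (text : String) : Option String :=
  let marker := "\"Improved_variable\": "
  let idx := PySem.Str.find text marker
  if idx = -1 then none
  else
    let e0 := PySem.Str.findFrom text "\n" idx none
    let e := if e0 = -1 then PySem.Str.len text else e0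
    some (PySem.Str.strip (PySem.Str.slice text (some (idx + PySem.Str.len marker)) (some e)))

-- ===== PRECONDITION & SPEC =====
def Spec_extract_new_prompt (text : String) (out : Option String) : Prop := out = extract_new_prompt_alt text
instance (text : String) (out : Option String) : Decidable (Spec_extract_new_prompt text out) := by unfold Spec_extract_new_prompt; infer_instance

-- ===== CLAIM (what is proved, stated in full; the proofs are below) =====
def Claim_equal_extract_new_prompt : Prop := ∀ (text : String), Dom_extract_new_prompt text → Spec_extract_new_prompt text (extract_new_prompt text)

-- ===== LEMMAS AND PROOFS =====

-- the marker, as a character list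
def pvM : List Char := "\"Improved_variable\": ".toList

-- reference splitter: Python's s.split('\n') on character lists
def pvPieces : List Char → List Char → List (List Char)
  | [], cur => [cur.reverse]
  | c :: rest, cur => if c = '\n' then cur.reverse :: pvPieces rest [] else pvPieces rest (c :: cur)

-- chars-level image of A's loop
def pvAC : List (List Char) → Option (List Char)
  | [] => none
  | l :: rest =>
    if PySem.Chars.isIn pvM l then
      some (PySem.Chars.strip (PySem.Chars.slice l
        (some (PySem.Chars.find l pvM + (pvM.length : Int))) none))
    else pvAC rest

-- chars-level image of B
def pvBC (s : List Char) : Option (List Char) :=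
  let f := PySem.Chars.find s pvM
  if f = -1 then none
  else
    let e0 := PySem.Chars.findFrom s ['\n'] f none
    let e := if e0 = -1 then (s.length : Int) else e0
    some (PySem.Chars.strip (PySem.Chars.slice s (some (f + (pvM.length : Int))) (some e)))

lemma pv_go_eq_pieces : ∀ (l : List Char) (fuel : Nat), l.length ≤ fuel → ∀ (cur : List Char) (acc : List (List Char)),
    PySem.Chars.splitOn.go ['\n'] fuel l cur acc = acc.reverse ++ pvPieces l cur := by
  intro l
  induction l with
  | nil =>
    intro fuel _ cur acc
    cases fuel <;> simp [PySem.Chars.splitOn.go, pvPieces]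
  | cons c rest ih =>
    intro fuel hfuel cur acc
    cases fuel with
    | zero => simp at hfuel
    | succ f =>
      have hf : rest.length ≤ f := by simp at hfuel; omega
      by_cases hc : c = '\n'
      · subst hc
        simp [PySem.Chars.splitOn.go, List.isPrefixOf, pvPieces, ih f hf]
      · have hc' : ¬ '\n' = c := fun h => hc h.symm
        simp [PySem.Chars.splitOn.go, List.isPrefixOf, hc', pvPieces, hc, ih f hf]

lemma pv_splitOn_eq_pieces (s : List Char) :
    PySem.Chars.splitOn s ['\n'] = pvPieces s [] := by
  unfold PySem.Chars.splitOn
  simpa using pv_go_eq_pieces s (s.length + 1) (by omega) [] []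

lemma pv_pieces_no_nl {l : List Char} (hl : '\n' ∉ l) : ∀ cur, pvPieces l cur = [cur.reverse ++ l] := by
  induction l with
  | nil => intro cur; simp [pvPieces]
  | cons c rest ih =>
    intro cur
    have hc : c ≠ '\n' := fun h => hl (h ▸ List.mem_cons_self)
    have hrest : '\n' ∉ rest := fun h => hl (List.mem_cons_of_mem _ h)
    simp [pvPieces, hc, ih hrest]

lemma pv_pieces_split {a : List Char} (ha : '\n' ∉ a) (b : List Char) :
    ∀ cur, pvPieces (a ++ '\n' :: b) cur = (cur.reverse ++ a) :: pvPieces b [] := by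
  induction a with
  | nil => intro cur; simp [pvPieces]
  | cons c rest ih =>
    intro cur
    have hc : c ≠ '\n' := fun h => ha (h ▸ List.mem_cons_self)
    have hrest : '\n' ∉ rest := fun h => ha (List.mem_cons_of_mem _ h)
    simp [pvPieces, hc, ih hrest]

lemma pv_nl_decomp (s : List Char) : '\n' ∉ s ∨ ∃ a b, s = a ++ '\n' :: b ∧ '\n' ∉ a := by
  induction s with
  | nil => left; simp
  | cons c rest ih =>
    by_cases hc : c = '\n'
    · right; exact ⟨[], rest, by simp [hc], by simp⟩
    · rcases ih with h | ⟨a, b, rfl, ha⟩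
      · left
        intro hm
        rcases List.mem_cons.mp hm with h1 | h1
        · exact hc h1.symm
        · exact h h1
      · right
        refine ⟨c :: a, b, rfl, ?_⟩
        intro hm
        rcases List.mem_cons.mp hm with h1 | h1
        · exact hc h1.symm
        · exact ha h1

lemma pv_find_spec0 (s sub : List Char) (h : PySem.Chars.find s sub ≠ -1) :
    sub <+: s.drop (PySem.Chars.find s sub).toNat ∧
      ∀ i < (PySem.Chars.find s sub).toNat, ¬ sub <+: s.drop i := by
  have h0 : (0:Nat) ≤ s.length := Nat.zero_le _
  have := PySem.Chars.findFrom_natCast_spec s sub 0 h0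
  simp [PySem.Chars.findFrom_zero] at this
  obtain ⟨h0, hp, hmin⟩ := this h
  refine ⟨hp, fun i hi => hmin i ?_⟩
  omega

lemma pv_find_eq_of {s sub : List Char} (j : Nat) (h1 : sub <+: s.drop j)
    (h2 : ∀ i < j, ¬ sub <+: s.drop i) : PySem.Chars.find s sub = (j : Int) := by
  have hinf : sub <:+: s := h1.isInfix.trans (List.drop_suffix j s).isInfix
  have hne : PySem.Chars.find s sub ≠ -1 := by
    rw [Ne, PySem.Chars.find_eq_neg_one_iff]; exact fun h => h hinf
  obtain ⟨hp, hmin⟩ := pv_find_spec0 s sub hne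
  have hnn : 0 ≤ PySem.Chars.find s sub := by
    have := PySem.Chars.neg_one_le_find s sub; omega
  have hf : (PySem.Chars.find s sub).toNat = j := by
    rcases Nat.lt_trichotomy (PySem.Chars.find s sub).toNat j with hlt | heq | hgt
    · exact absurd hp (h2 _ hlt)
    · exact heq
    · exact absurd h1 (hmin _ hgt)
  omega

lemma pv_drop_shift (a b : List Char) (k : Nat) :
    (a ++ '\n' :: b).drop (a.length + 1 + k) = b.drop k := by
  rw [List.drop_append]
  have h1 : a.length + 1 + k - a.length = k + 1 := by omega
  rw [h1]
  simp [List.drop_of_length_le (show a.length ≤ a.length + 1 + k by omega)]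

lemma pv_occ_cases {a b : List Char} {j : Nat} (h : pvM <+: (a ++ '\n' :: b).drop j) :
    (j + pvM.length ≤ a.length ∧ pvM <+: a.drop j) ∨
      (a.length + 1 ≤ j ∧ pvM <+: b.drop (j - (a.length + 1))) := by
  by_cases hj : a.length + 1 ≤ j
  · right
    refine ⟨hj, ?_⟩
    have : (a ++ '\n' :: b).drop j = b.drop (j - (a.length + 1)) := by
      have := pv_drop_shift a b (j - (a.length + 1))
      rwa [show a.length + 1 + (j - (a.length + 1)) = j by omega] at this
    rwa [this] at h
  · left
    have hja : j ≤ a.length := by omega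
    have hlen : j + pvM.length ≤ a.length := by
      by_contra hcon
      have hk : a.length - j < pvM.length := by omega
      have hkd : a.length - j < ((a ++ '\n' :: b).drop j).length := by
        simp; omega
      have h1 : pvM[a.length - j]'hk = ((a ++ '\n' :: b).drop j)[a.length - j]'hkd :=
        h.getElem hk
      have h2 : ((a ++ '\n' :: b).drop j)[a.length - j]'hkd = (a ++ '\n' :: b)[a.length]'(by simp) := by
        rw [List.getElem_drop]
        congr 1
        omega
      have h3 : (a ++ '\n' :: b)[a.length]'(by simp) = '\n' := by
        rw [List.getElem_append_right le_rfl]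
        simp
      have : '\n' ∈ pvM := by
        rw [← h3, ← h2, ← h1]
        exact List.getElem_mem hk
      exact absurd this (by decide)
    refine ⟨hlen, ?_⟩
    rw [List.prefix_iff_eq_take] at h
    rw [List.drop_append_of_le_length hja,
      List.take_append_of_le_length (by simp only [List.length_drop]; omega)] at h
    exact List.prefix_iff_eq_take.mpr h

lemma pv_find_left {a : List Char} (b : List Char) (hin : PySem.Chars.isIn pvM a = true) :
    PySem.Chars.find (a ++ '\n' :: b) pvM = PySem.Chars.find a pvM := by
  have hne : PySem.Chars.find a pvM ≠ -1 := by
    rw [Ne, PySem.Chars.find_eq_neg_one_iff]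
    exact fun hcon => hcon ((PySem.Chars.isIn_iff_infix _ _).mp hin)
  have hnn : 0 ≤ PySem.Chars.find a pvM := by
    have := PySem.Chars.neg_one_le_find a pvM; omega
  set f := (PySem.Chars.find a pvM).toNat with hfdef
  have hfle : f ≤ a.length := by
    have := PySem.Chars.find_le_length a pvM; omega
  obtain ⟨hp, hmin⟩ := pv_find_spec0 a pvM hne
  have hres : PySem.Chars.find (a ++ '\n' :: b) pvM = (f : Int) := by
    apply pv_find_eq_of
    · rw [List.drop_append_of_le_length hfle]
      exact hp.trans (List.prefix_append _ _)
    · intro i hi hcon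
      rcases pv_occ_cases hcon with ⟨_, hpa⟩ | ⟨hge, _⟩
      · exact hmin i hi hpa
      · omega
  rw [hres]; omega

lemma pv_find_right {a : List Char} (b : List Char) (hin : PySem.Chars.isIn pvM a = false) :
    PySem.Chars.find (a ++ '\n' :: b) pvM =
      if PySem.Chars.find b pvM = -1 then -1
      else (a.length : Int) + 1 + PySem.Chars.find b pvM := by
  have hnotin : ∀ i : Nat, ¬ pvM <+: a.drop i := by
    intro i hcon
    have : PySem.Chars.isIn pvM a = true :=
      (PySem.Chars.exists_prefix_drop_iff_isIn pvM a).mp ⟨i, hcon⟩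
    simp [hin] at this
  split_ifs with hb
  · rw [PySem.Chars.find_eq_neg_one_iff]
    intro hinf
    have : PySem.Chars.isIn pvM (a ++ '\n' :: b) = true :=
      (PySem.Chars.isIn_iff_infix _ _).mpr hinf
    obtain ⟨j, hj⟩ := (PySem.Chars.exists_prefix_drop_iff_isIn pvM _).mpr this
    rcases pv_occ_cases hj with ⟨_, hpa⟩ | ⟨_, hpb⟩
    · exact hnotin _ hpa
    · have : pvM <:+: b := hpb.isInfix.trans (List.drop_suffix _ b).isInfix
      rw [PySem.Chars.find_eq_neg_one_iff] at hb
      exact hb this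
  · have hnn : 0 ≤ PySem.Chars.find b pvM := by
      have := PySem.Chars.neg_one_le_find b pvM; omega
    set g := (PySem.Chars.find b pvM).toNat with hgdef
    obtain ⟨hp, hmin⟩ := pv_find_spec0 b pvM hb
    have hres : PySem.Chars.find (a ++ '\n' :: b) pvM = ((a.length + 1 + g : Nat) : Int) := by
      apply pv_find_eq_of
      · rw [pv_drop_shift]
        exact hp
      · intro i hi hcon
        rcases pv_occ_cases hcon with ⟨_, hpa⟩ | ⟨hge, hpb⟩
        · exact hnotin _ hpa
        · exact hmin (i - (a.length + 1)) (by omega) hpb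
    rw [hres]; push_cast; omega

lemma pv_find_nl_none {s : List Char} (hs : '\n' ∉ s) : PySem.Chars.find s ['\n'] = -1 := by
  rw [PySem.Chars.find_eq_neg_one_iff]
  intro hinf
  exact hs (hinf.subset (by simp))

lemma pv_find_nl {a : List Char} (ha : '\n' ∉ a) (b : List Char) :
    PySem.Chars.find (a ++ '\n' :: b) ['\n'] = (a.length : Int) := by
  apply pv_find_eq_of
  · rw [List.drop_append_of_le_length le_rfl]
    simp
  · intro i hi hcon
    obtain ⟨t, ht⟩ := hcon
    have h0 : (List.drop i (a ++ '\n' :: b))[0]'(by rw [← ht]; simp) = '\n' := by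
      simp [← ht]
    rw [List.getElem_drop] at h0
    simp only [Nat.add_zero] at h0
    have h1 : (a ++ '\n' :: b)[i]'(by simp; omega) = a[i]'(by omega) := by
      rw [List.getElem_append_left (by omega)]
    rw [h1] at h0
    exact ha (h0 ▸ List.getElem_mem _)

lemma pv_AC_cons_true {l : List Char} (rest : List (List Char))
    (hin : PySem.Chars.isIn pvM l = true) (f : Nat) (hf : PySem.Chars.find l pvM = (f : Int)) :
    pvAC (l :: rest) = some (PySem.Chars.strip (l.drop (f + pvM.length))) := by
  simp only [pvAC, hin, if_true, hf]
  rw [show (f : Int) + (pvM.length : Int) = ((f + pvM.length : Nat) : Int) by push_cast; ring]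
  simp only [PySem.Chars.slice_eq_listSlice, PySem.List.slice_from_natCast]

lemma pv_AC_cons_false {l : List Char} (rest : List (List Char))
    (hin : ¬ PySem.Chars.isIn pvM l = true) : pvAC (l :: rest) = pvAC rest := by
  simp only [pvAC]
  rw [if_neg hin]

lemma pv_BC_none {s : List Char} (h : PySem.Chars.find s pvM = -1) : pvBC s = none := by
  simp only [pvBC, h]
  exact if_pos trivial

lemma pv_BC_eq {s : List Char} (f e : Nat) (hf : PySem.Chars.find s pvM = (f : Int))
    (he : (if PySem.Chars.findFrom s ['\n'] (f : Int) none = -1 then (s.length : Int)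
            else PySem.Chars.findFrom s ['\n'] (f : Int) none) = (e : Int)) :
    pvBC s = some (PySem.Chars.strip ((s.drop (f + pvM.length)).take (e - (f + pvM.length)))) := by
  simp only [pvBC, hf]
  rw [if_neg (show ¬(f : Int) = -1 by omega), he]
  rw [show (f : Int) + (pvM.length : Int) = ((f + pvM.length : Nat) : Int) by push_cast; ring]
  simp only [PySem.Chars.slice_eq_listSlice, PySem.List.slice_natCast]

lemma pv_one_line {s : List Char} (hs : '\n' ∉ s) : pvAC (pvPieces s []) = pvBC s := by
  rw [pv_pieces_no_nl hs []]
  simp only [List.reverse_nil, List.nil_append]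
  by_cases hin : PySem.Chars.isIn pvM s = true
  · have hne : PySem.Chars.find s pvM ≠ -1 := by
      rw [Ne, PySem.Chars.find_eq_neg_one_iff]
      exact fun hcon => hcon ((PySem.Chars.isIn_iff_infix _ _).mp hin)
    have hnn : 0 ≤ PySem.Chars.find s pvM := by
      have := PySem.Chars.neg_one_le_find s pvM; omega
    obtain ⟨f, hfval⟩ : ∃ f : Nat, PySem.Chars.find s pvM = (f : Int) :=
      ⟨(PySem.Chars.find s pvM).toNat, by omega⟩
    have hfle : f ≤ s.length := by
      have := PySem.Chars.find_le_length s pvM; omega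
    have hnl : PySem.Chars.find (List.drop f s) ['\n'] = -1 :=
      pv_find_nl_none (fun h => hs (List.drop_subset f s h))
    have hff : PySem.Chars.findFrom s ['\n'] (f : Int) none = -1 := by
      rw [PySem.Chars.findFrom_natCast s ['\n'] f hfle, hnl, if_pos rfl]
    rw [pv_AC_cons_true [] hin f hfval,
      pv_BC_eq f s.length hfval (by rw [hff, if_pos rfl]),
      List.take_of_length_le (by simp only [List.length_drop]; omega)]
  · have hfneg : PySem.Chars.find s pvM = -1 := by
      rw [PySem.Chars.find_eq_neg_one_iff]
      exact fun hcon => hin ((PySem.Chars.isIn_iff_infix pvM s).mpr hcon)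
    rw [pv_AC_cons_false [] hin, pv_BC_none hfneg]
    rfl

lemma pv_main : ∀ (n : Nat) (s : List Char), s.length ≤ n → pvAC (pvPieces s []) = pvBC s := by
  intro n
  induction n with
  | zero =>
    intro s hs
    have : s = [] := List.length_eq_zero_iff.mp (Nat.le_zero.mp hs)
    subst this
    exact pv_one_line (by simp)
  | succ n ih =>
    intro s hs
    rcases pv_nl_decomp s with hnl | ⟨a, b, rfl, ha⟩
    · exact pv_one_line hnl
    · rw [pv_pieces_split ha b []]
      simp only [List.reverse_nil, List.nil_append]
      have hblen : b.length ≤ n := by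
        simp only [List.length_append, List.length_cons] at hs; omega
      by_cases hin : PySem.Chars.isIn pvM a = true
      · -- match in the first line
        have hne : PySem.Chars.find a pvM ≠ -1 := by
          rw [Ne, PySem.Chars.find_eq_neg_one_iff]
          exact fun hcon => hcon ((PySem.Chars.isIn_iff_infix _ _).mp hin)
        have hnn : 0 ≤ PySem.Chars.find a pvM := by
          have := PySem.Chars.neg_one_le_find a pvM; omega
        obtain ⟨f, hfval⟩ : ∃ f : Nat, PySem.Chars.find a pvM = (f : Int) :=
          ⟨(PySem.Chars.find a pvM).toNat, by omega⟩
        obtain ⟨hp, _⟩ := pv_find_spec0 a pvM hne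
        rw [hfval] at hp
        simp only [Int.toNat_natCast] at hp
        have hfle : f ≤ a.length := by
          have := PySem.Chars.find_le_length a pvM; omega
        have hfM : f + pvM.length ≤ a.length := by
          have := hp.length_le
          simp only [List.length_drop] at this
          omega
        have hfs : PySem.Chars.find (a ++ '\n' :: b) pvM = (f : Int) := by
          rw [pv_find_left b hin, hfval]
        have hfles : f ≤ (a ++ '\n' :: b).length :=
          le_trans hfle (by simp only [List.length_append, List.length_cons]; omega)
        have hnlf : PySem.Chars.find ((a ++ '\n' :: b).drop f) ['\n'] = ((a.drop f).length : Int) := by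
          rw [List.drop_append_of_le_length hfle]
          exact pv_find_nl (fun h => ha (List.drop_subset f a h)) b
        have hff : PySem.Chars.findFrom (a ++ '\n' :: b) ['\n'] (f : Int) none = (a.length : Int) := by
          rw [PySem.Chars.findFrom_natCast _ ['\n'] f hfles, hnlf]
          rw [if_neg (by omega)]
          simp only [List.length_drop]
          omega
        rw [pv_AC_cons_true _ hin f hfval,
          pv_BC_eq f a.length hfs (by rw [hff, if_neg (show ¬(a.length : Int) = -1 by omega)])]
        have hdrop2 : (a ++ '\n' :: b).drop (f + pvM.length) = a.drop (f + pvM.length) ++ '\n' :: b :=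
          List.drop_append_of_le_length hfM
        rw [hdrop2, List.take_append_of_le_length (by simp only [List.length_drop]; omega),
          List.take_of_length_le (by simp only [List.length_drop]; omega)]
      · -- no match in the first line: both sides reduce to the tail
        have htail := ih b hblen
        rw [pv_AC_cons_false _ hin, htail]
        have hfr := pv_find_right b (by simpa using hin)
        by_cases hb : PySem.Chars.find b pvM = -1
        · rw [pv_BC_none hb, pv_BC_none (by rw [hfr, if_pos hb])]
        · have hnn : 0 ≤ PySem.Chars.find b pvM := by
            have := PySem.Chars.neg_one_le_find b pvM; omega
          obtain ⟨g, hgval⟩ : ∃ g : Nat, PySem.Chars.find b pvM = (g : Int) :=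
            ⟨(PySem.Chars.find b pvM).toNat, by omega⟩
          have hgle : g ≤ b.length := by
            have := PySem.Chars.find_le_length b pvM; omega
          have hfs : PySem.Chars.find (a ++ '\n' :: b) pvM = ((a.length + 1 + g : Nat) : Int) := by
            rw [hfr, if_neg hb, hgval]; push_cast; ring
          have hlen_s : a.length + 1 + g ≤ (a ++ '\n' :: b).length := by
            simp only [List.length_append, List.length_cons]; omega
          have hdshift : (a ++ '\n' :: b).drop (a.length + 1 + g) = b.drop g := pv_drop_shift a b g
          have hdshiftM : (a ++ '\n' :: b).drop (a.length + 1 + g + pvM.length) = b.drop (g + pvM.length) := by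
            have := pv_drop_shift a b (g + pvM.length)
            rwa [show a.length + 1 + (g + pvM.length) = a.length + 1 + g + pvM.length by omega] at this
          have hffs0 := PySem.Chars.findFrom_natCast (a ++ '\n' :: b) ['\n'] (a.length + 1 + g) hlen_s
          rw [hdshift] at hffs0
          have hffb0 := PySem.Chars.findFrom_natCast b ['\n'] g hgle
          by_cases hbnl : PySem.Chars.find (b.drop g) ['\n'] = -1
          · rw [hbnl, if_pos rfl] at hffs0 hffb0
            rw [pv_BC_eq (a.length + 1 + g) (a.length + 1 + b.length) hfs
                (by rw [hffs0, if_pos rfl]; simp only [List.length_append, List.length_cons]; push_cast; ring)]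
            rw [pv_BC_eq g b.length hgval (by rw [hffb0, if_pos rfl])]
            rw [hdshiftM,
              show a.length + 1 + b.length - (a.length + 1 + g + pvM.length) = b.length - (g + pvM.length) from by omega]
          · have hvnn : 0 ≤ PySem.Chars.find (b.drop g) ['\n'] := by
              have := PySem.Chars.neg_one_le_find (b.drop g) ['\n']; omega
            obtain ⟨v, hvval⟩ : ∃ v : Nat, PySem.Chars.find (b.drop g) ['\n'] = (v : Int) :=
              ⟨(PySem.Chars.find (b.drop g) ['\n']).toNat, by omega⟩
            rw [hvval, if_neg (by omega)] at hffs0 hffb0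
            rw [pv_BC_eq (a.length + 1 + g) (a.length + 1 + g + v) hfs
                (by rw [hffs0, if_neg (by push_cast; omega)]; push_cast; ring)]
            rw [pv_BC_eq g (g + v) hgval
                (by rw [hffb0, if_neg (by push_cast; omega)]; push_cast; ring)]
            rw [hdshiftM,
              show a.length + 1 + g + v - (a.length + 1 + g + pvM.length) = g + v - (g + pvM.length) from by omega]

lemma pv_loopA_bridge (lines : List String) :
    pvLoopA "\"Improved_variable\": " lines = (pvAC (lines.map String.toList)).map String.ofList := by
  have hM : ("\"Improved_variable\": " : String).toList = pvM := rfl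
  induction lines with
  | nil => rfl
  | cons line rest ih =>
    simp only [pvLoopA, pvAC, List.map_cons]
    rw [PySem.Str.isIn_eq, hM]
    by_cases h : PySem.Chars.isIn pvM line.toList = true
    · rw [if_pos h, if_pos h, Option.map_some]
      refine congrArg some ?_
      conv_lhs => rw [← String.ofList_toList (s := PySem.Str.strip (PySem.Str.slice line
        (some (PySem.Str.find line "\"Improved_variable\": " + PySem.Str.len "\"Improved_variable\": ")) none))]
      refine congrArg String.ofList ?_
      rw [PySem.Str.toList_strip, PySem.Str.toList_slice, PySem.Str.find_eq, PySem.Str.len_eq, hM]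
    · rw [if_neg h, if_neg h, ih]

lemma pv_alt_bridge (text : String) :
    extract_new_prompt_alt text = (pvBC text.toList).map String.ofList := by
  have hM : ("\"Improved_variable\": " : String).toList = pvM := rfl
  have hNL : ("\n" : String).toList = ['\n'] := rfl
  simp only [extract_new_prompt_alt, pvBC]
  rw [PySem.Str.find_eq, hM]
  by_cases h : PySem.Chars.find text.toList pvM = -1
  · rw [if_pos h, if_pos h]
    rfl
  · rw [if_neg h, if_neg h, Option.map_some]
    refine congrArg some ?_
    conv_lhs => rw [← String.ofList_toList (s := PySem.Str.strip (PySem.Str.slice text _ _))]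
    refine congrArg String.ofList ?_
    rw [PySem.Str.toList_strip, PySem.Str.toList_slice, PySem.Str.findFrom_eq, hNL,
      PySem.Str.len_eq, PySem.Str.len_eq, hM]

lemma pv_a_bridge (text : String) :
    extract_new_prompt text = (pvAC (pvPieces text.toList [])).map String.ofList := by
  have hsp : PySem.Chars.split? text.toList ("\n" : String).toList =
      some (PySem.Chars.splitOn text.toList ['\n']) := by
    show PySem.Chars.split? text.toList ['\n'] = _
    simp [PySem.Chars.split?]
  cases h : PySem.Str.split? text "\n" with
  | none =>
    exfalso
    have := PySem.Str.split?_map text "\n"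
    rw [h] at this
    rw [hsp] at this
    simp at this
  | some L =>
    have hmap := PySem.Str.split?_map text "\n"
    rw [h, hsp] at hmap
    simp only [Option.map_some, Option.some.injEq] at hmap
    show pvLoopA "\"Improved_variable\": " ((PySem.Str.split? text "\n").getD []) = _
    rw [h]
    simp only [Option.getD_some]
    rw [pv_loopA_bridge L, hmap, pv_splitOn_eq_pieces]

-- ===== VERDICT (by name: the statement is the Claim_ definition above) =====
theorem extract_new_prompt_spec : Claim_equal_extract_new_prompt := by
  intro text _
  show extract_new_prompt text = extract_new_prompt_alt text
  rw [pv_a_bridge, pv_alt_bridge, pv_main text.toList.length text.toList le_rfl]
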